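-- pv_equiv track=rewrite | github.com/johnMamish/lilcam | himax_usb_board/v1-0/util/serialcam.py | align_preamble
-- ===== SOURCE A (Python) =====
-- def align_preamble(arr, preamble):
--     """
--     This function checks to see if the preamble is in the current array.
--     If it isn't, the array is discarded.
--     If it is, the preamble is aligned to the start of the array.
--     """
--     if (arr[0:len(preamble)] == preamble):
--         return arr
--
--     matchidx = 0
--     for i in range(len(arr) - len(preamble) + 1):
--         if (arr[i:(i + len(preamble))] == preamble):
--             return arr[i:]
--     return arr
-- ===== SOURCE B (Python) =====
-- def align_preamble(arr, preamble):
--     """Walk suffixes of arr and return the first one that starts with preamble;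
--     if none does, return arr unchanged."""
--     tail = arr
--     while len(tail) >= len(preamble):
--         if all(x == y for x, y in zip(tail, preamble)):
--             return tail
--         tail = tail[1:]
--     return arr
-- ===== Notes on version B (the rewrite author's own statement) =====
-- stated objective: simpler
-- what changed: Replace the index loop over range() with per-step slice materialization (plus A's redundant initial prefix check and dead matchidx) by a single suffix-peeling loop that zip-compares the current suffix with the preamble and returns that suffix directly.
import Mathlib
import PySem

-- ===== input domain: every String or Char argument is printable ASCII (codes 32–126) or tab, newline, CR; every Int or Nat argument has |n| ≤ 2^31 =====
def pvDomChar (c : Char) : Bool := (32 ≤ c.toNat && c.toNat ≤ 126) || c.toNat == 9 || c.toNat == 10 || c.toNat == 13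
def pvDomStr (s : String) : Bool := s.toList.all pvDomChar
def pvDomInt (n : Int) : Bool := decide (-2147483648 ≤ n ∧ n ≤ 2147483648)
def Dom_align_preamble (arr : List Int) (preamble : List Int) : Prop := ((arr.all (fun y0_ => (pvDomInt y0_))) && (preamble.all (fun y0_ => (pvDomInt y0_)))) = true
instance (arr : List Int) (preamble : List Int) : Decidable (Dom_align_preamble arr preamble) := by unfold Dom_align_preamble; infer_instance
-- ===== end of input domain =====

-- B replaces A's index loop with slices (and its redundant initial check and dead
-- matchidx) by one suffix-peeling loop: simpler, same worst-case cost.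

-- ===== PORT A =====
-- the for-loop over range(len(arr)-len(preamble)+1) with early return
def alignLoopA (arr : List Int) (preamble : List Int) : List Int → List Int
  | [] => arr
  | i :: rest =>
    if PySem.List.slice arr (some i) (some (i + (preamble.length : Int))) = preamble then
      PySem.List.slice arr (some i) none
    else alignLoopA arr preamble rest

def align_preamble (arr : List Int) (preamble : List Int) : List Int :=
  if PySem.List.slice arr (some 0) (some (preamble.length : Int)) = preamble then arr
  else
    alignLoopA arr preamble
      (PySem.List.pyRange 0 ((arr.length : Int) - (preamble.length : Int) + 1) 1)

-- ===== PORT B =====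
-- the while-loop: peel the head off `tail` until it starts with preamble;
-- `none` = the loop fell through (tail got shorter than preamble)
def alignTailB (preamble : List Int) : List Int → Option (List Int)
  | [] => if preamble.length ≤ 0 then some [] else none
  | x :: rest =>
    if preamble.length ≤ rest.length + 1 then
      if ((x :: rest).zip preamble).all (fun p => p.1 == p.2) then some (x :: rest)
      else alignTailB preamble rest
    else none

def align_preamble_alt (arr : List Int) (preamble : List Int) : List Int :=
  (alignTailB preamble arr).getD arr

-- ===== PRECONDITION & SPEC =====
def Spec_align_preamble (arr : List Int) (preamble : List Int) (out : List Int) : Prop := out = align_preamble_alt arr preamble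
instance (arr : List Int) (preamble : List Int) (out : List Int) : Decidable (Spec_align_preamble arr preamble out) := by unfold Spec_align_preamble; infer_instance

-- ===== CLAIM (what is proved, stated in full; the proofs are below) =====
def Claim_equal_align_preamble : Prop := ∀ (arr : List Int) (preamble : List Int), Dom_align_preamble arr preamble → Spec_align_preamble arr preamble (align_preamble arr preamble)

-- ===== LEMMAS AND PROOFS =====

theorem alignTailB_short {preamble s : List Int} (h : s.length < preamble.length) :
    alignTailB preamble s = none := by
  cases s with
  | nil =>
      simp only [alignTailB, List.length_nil] at h ⊢
      rw [if_neg (by omega)]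
  | cons x rest =>
      simp only [alignTailB, List.length_cons] at h ⊢
      rw [if_neg (by omega)]

theorem zip_all_eq_take {preamble s : List Int} (h : preamble.length ≤ s.length) :
    ((s.zip preamble).all (fun p => p.1 == p.2) = true) ↔ s.take preamble.length = preamble := by
  induction preamble generalizing s with
  | nil => simp
  | cons p pt ih =>
      cases s with
      | nil => simp at h
      | cons x st =>
          simp only [List.zip_cons_cons, List.all_cons, List.length_cons, List.take_succ_cons,
            Bool.and_eq_true, beq_iff_eq, List.cons.injEq]
          constructor
          · rintro ⟨h1, h2⟩; exact ⟨h1, (ih (by simpa using Nat.le_of_succ_le_succ h)).mp h2⟩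
          · rintro ⟨h1, h2⟩; exact ⟨h1, (ih (by simpa using Nat.le_of_succ_le_succ h)).mpr h2⟩

theorem alignTailB_step {preamble s : List Int} (h : preamble.length ≤ s.length) :
    alignTailB preamble s =
      if (s.zip preamble).all (fun p => p.1 == p.2) then some s else alignTailB preamble s.tail := by
  cases s with
  | nil =>
      have hm : preamble.length = 0 := by simpa using h
      simp [alignTailB, List.length_eq_zero_iff.mp hm]
  | cons x rest =>
      simp only [List.length_cons] at h
      simp only [alignTailB, List.tail_cons]
      rw [if_pos (by omega)]

-- main bridge: A's loop from index i = B's peeling from suffix arr.drop i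
theorem loop_eq_tail (arr preamble : List Int) :
    ∀ (j i : Nat), i ≤ arr.length → arr.length - i ≤ j →
      alignLoopA arr preamble
        (PySem.List.pyRange (i : Int) ((arr.length : Int) - (preamble.length : Int) + 1) 1)
      = (alignTailB preamble (arr.drop i)).getD arr := by
  intro j
  induction j with
  | zero =>
      intro i hi hj
      have hie : i = arr.length := by omega
      subst hie
      by_cases hm : preamble.length = 0
      · have hpre : preamble = [] := List.length_eq_zero_iff.mp hm
        rw [PySem.List.pyRange_one_cons (by omega)]
        simp only [alignLoopA]
        rw [if_pos (by rw [PySem.List.slice_natCast_add]; simp [hpre])]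
        rw [PySem.List.slice_from_natCast]
        simp [hpre, alignTailB]
      · rw [PySem.List.pyRange_one_eq_nil (by omega)]
        simp only [alignLoopA]
        rw [List.drop_length, alignTailB_short (by simpa using Nat.pos_of_ne_zero hm)]
        rfl
  | succ j ih =>
      intro i hi hj
      by_cases hlt : (i : Int) < (arr.length : Int) - (preamble.length : Int) + 1
      · -- the range is nonempty: i ≤ arr.length - preamble.length
        have hml : preamble.length ≤ arr.length - i := by omega
        rw [PySem.List.pyRange_one_cons hlt]
        simp only [alignLoopA]
        rw [PySem.List.slice_natCast_add arr i preamble.length, PySem.List.slice_from_natCast]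
        have hlen : preamble.length ≤ (arr.drop i).length := by
          simp [List.length_drop]; omega
        rw [alignTailB_step hlen]
        by_cases hmatch : (arr.drop i).take preamble.length = preamble
        · rw [if_pos hmatch, if_pos ((zip_all_eq_take hlen).mpr hmatch)]
          rfl
        · rw [if_neg hmatch, if_neg (by
            intro hc
            exact hmatch ((zip_all_eq_take hlen).mp hc))]
          have hm1 : 1 ≤ preamble.length := by
            by_contra hc
            have : preamble.length = 0 := by omega
            exact hmatch (by simp [List.length_eq_zero_iff.mp this])
          have : ((i : Int) + 1) = ((i + 1 : Nat) : Int) := by push_cast; ring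
          rw [this, List.tail_drop]
          exact ih (i + 1) (by omega) (by omega)
      · rw [PySem.List.pyRange_one_eq_nil (by omega)]
        have hsh : (arr.drop i).length < preamble.length := by
          simp [List.length_drop]; omega
        rw [alignTailB_short hsh]
        rfl

-- ===== VERDICT (by name: the statement is the Claim_ definition above) =====
theorem align_preamble_spec : Claim_equal_align_preamble := by
  intro arr preamble _
  unfold Spec_align_preamble align_preamble align_preamble_alt
  rw [PySem.List.slice_zero_start, PySem.List.slice_to_natCast]
  by_cases h0 : arr.take preamble.length = preamble
  · rw [if_pos h0]
    have hlen : preamble.length ≤ arr.length := by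
      have := congrArg List.length h0
      simp [List.length_take] at this
      omega
    rw [alignTailB_step (s := arr) hlen,
        if_pos ((zip_all_eq_take (s := arr) hlen).mpr h0)]
    rfl
  · rw [if_neg h0]
    have := loop_eq_tail arr preamble arr.length 0 (by omega) (by omega)
    simpa using this
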